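-- pv_equiv track=rewrite | github.com/no7hings/lxdcc | resource/plug/maya/lynxinode/plug-ins/lxConvertNodeExtra.py | get_v_edge_indices
-- ===== SOURCE A (Python) =====
-- def get_v_edge_indices(u_count, v_count):
--     id_start = 0
--     list_ = []
--     for i_u in range(u_count):
--         for i_v in range(v_count):
--             i_is_corner = i_u == 0 and i_v == 0
--             i_is_u_border = i_v == 0
--             i_is_v_border = i_u == 0
--             if i_is_corner is True:
--                 list_.extend([id_start, id_start + 2])
--                 id_start += 4
--             elif i_is_v_border is True:
--                 list_.extend([id_start, id_start + 2])
--                 id_start += 3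
--             elif i_is_u_border:
--                 list_.append(id_start + 1)
--                 id_start += 3
--             else:
--                 list_.append(id_start + 1)
--                 id_start += 2
--     return list_
-- ===== SOURCE B (Python) =====
-- def get_v_edge_indices(u_count, v_count):
--     # Closed-form bases instead of a running id_start accumulator.
--     if u_count <= 0 or v_count <= 0:
--         return []
--     out = []
--     # Row 0: each cell emits two indices; cell i_v starts at 0 (i_v==0) or 3*i_v+1.
--     for i_v in range(v_count):
--         s = 0 if i_v == 0 else 3 * i_v + 1
--         out += [s, s + 2]
--     # Rows i_u >= 1: row base is a direct formula; each cell emits one index.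
--     row0_total = 3 * v_count + 1
--     row_stride = 2 * v_count + 1
--     for i_u in range(1, u_count):
--         base = row0_total + (i_u - 1) * row_stride
--         out.append(base + 1)
--         for i_v in range(1, v_count):
--             out.append(base + 2 * i_v + 2)
--     return out
-- ===== Notes on version B (the rewrite author's own statement) =====
-- stated objective: alternative
-- what changed: Replaces A's sequential id_start accumulator threaded through nested loops by closed-form base offsets: row 0 cell i_v starts at 3*i_v+1 (0 for the corner), row i_u>=1 has base 3*v_count+1 + (i_u-1)*(2*v_count+1) and its cell i_v emits base+2*i_v+2 (base+1 for i_v=0).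
import Mathlib
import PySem

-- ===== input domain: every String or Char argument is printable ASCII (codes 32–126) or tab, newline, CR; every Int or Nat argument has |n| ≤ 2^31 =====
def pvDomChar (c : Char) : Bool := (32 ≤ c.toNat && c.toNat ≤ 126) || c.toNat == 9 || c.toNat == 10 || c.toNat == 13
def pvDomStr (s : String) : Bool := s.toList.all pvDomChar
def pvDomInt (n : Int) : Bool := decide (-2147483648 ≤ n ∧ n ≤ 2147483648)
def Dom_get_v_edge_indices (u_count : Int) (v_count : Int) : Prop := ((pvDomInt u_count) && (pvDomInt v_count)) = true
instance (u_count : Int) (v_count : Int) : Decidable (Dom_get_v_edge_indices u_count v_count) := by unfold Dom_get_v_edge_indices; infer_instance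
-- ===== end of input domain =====

-- B replaces A's running id_start accumulator by closed-form per-row base offsets (objective: alternative decomposition).

-- ===== PORT A =====
-- loop body of A's inner 'for i_v' loop, state = (id_start, list_)
def pvStepA (i_u : Int) (st : Int × List Int) (i_v : Int) : Int × List Int :=
  if i_u == 0 && i_v == 0 then (st.1 + 4, st.2 ++ [st.1, st.1 + 2])
  else if i_u == 0 then (st.1 + 3, st.2 ++ [st.1, st.1 + 2])
  else if i_v == 0 then (st.1 + 3, st.2 ++ [st.1 + 1])
  else (st.1 + 2, st.2 ++ [st.1 + 1])

def get_v_edge_indices (u_count : Int) (v_count : Int) : List Int :=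
  ((PySem.List.pyRange 0 u_count 1).foldl
    (fun st i_u => (PySem.List.pyRange 0 v_count 1).foldl (pvStepA i_u) st)
    ((0 : Int), ([] : List Int))).2

-- ===== PORT B =====
def get_v_edge_indices_alt (u_count : Int) (v_count : Int) : List Int :=
  if u_count ≤ 0 ∨ v_count ≤ 0 then []
  else
    let row0 := (PySem.List.pyRange 0 v_count 1).foldl
      (fun acc i_v =>
        acc ++ (let s := if i_v == 0 then (0 : Int) else 3 * i_v + 1; [s, s + 2])) []
    let row0_total := 3 * v_count + 1
    let row_stride := 2 * v_count + 1
    (PySem.List.pyRange 1 u_count 1).foldl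
      (fun acc i_u =>
        let base := row0_total + (i_u - 1) * row_stride
        (PySem.List.pyRange 1 v_count 1).foldl
          (fun acc2 i_v => acc2 ++ [base + 2 * i_v + 2]) (acc ++ [base + 1]))
      row0

-- ===== PRECONDITION & SPEC =====
def Spec_get_v_edge_indices (u_count : Int) (v_count : Int) (out : List Int) : Prop := out = get_v_edge_indices_alt u_count v_count
instance (u_count : Int) (v_count : Int) (out : List Int) : Decidable (Spec_get_v_edge_indices u_count v_count out) := by unfold Spec_get_v_edge_indices; infer_instance

-- ===== CLAIM (what is proved, stated in full; the proofs are below) =====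
def Claim_equal_get_v_edge_indices : Prop := ∀ (u_count : Int) (v_count : Int), Dom_get_v_edge_indices u_count v_count → Spec_get_v_edge_indices u_count v_count (get_v_edge_indices u_count v_count)

-- ===== LEMMAS AND PROOFS =====

-- B's row-0 cell and the list one non-zero row of A appends
def pvCell0 (i_v : Int) : List Int :=
  let s := if i_v == 0 then (0 : Int) else 3 * i_v + 1; [s, s + 2]

def pvRowList (b : Int) (v : Int) : List Int :=
  (b + 1) :: (PySem.List.pyRange 1 v 1).map (fun i_v => b + 2 * i_v + 2)

-- A's first row (i_u = 0): id_start ends at 3v+1 and the cells of pvCell0 are appended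
theorem pvRow0A (v : Int) (hv : 1 ≤ v) :
    ∀ l : List Int,
      (PySem.List.pyRange 0 v 1).foldl (pvStepA 0) (0, l)
        = (3 * v + 1, l ++ (PySem.List.pyRange 0 v 1).flatMap pvCell0) := by
  induction v, hv using Int.le_induction with
  | base =>
    intro l
    have h01 : PySem.List.pyRange 0 1 1 = [(0 : Int)] := by decide
    rw [h01]
    simp [pvStepA, pvCell0]
  | succ n hn ih =>
    intro l
    rw [PySem.List.pyRange_one_succ_right (by omega), List.foldl_append, ih,
      List.flatMap_append, List.foldl_cons, List.foldl_nil]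
    have hn0 : (n == (0 : Int)) = false := by simp; omega
    rw [Prod.ext_iff]
    refine ⟨by simp [pvStepA, hn0]; ring, ?_⟩
    simp [pvStepA, pvCell0, hn0, List.append_assoc]

-- one non-zero row of A (i_u = j ≠ 0): id_start advances by 2v+1 and pvRowList is appended
theorem pvRowA (v : Int) (hv : 1 ≤ v) :
    ∀ (j b : Int) (l : List Int), j ≠ 0 →
      (PySem.List.pyRange 0 v 1).foldl (pvStepA j) (b, l)
        = (b + 2 * v + 1, l ++ pvRowList b v) := by
  induction v, hv using Int.le_induction with
  | base =>
    intro j b l hj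
    have h01 : PySem.List.pyRange 0 1 1 = [(0 : Int)] := by decide
    have h11 : PySem.List.pyRange 1 1 1 = ([] : List Int) := by decide
    rw [h01]
    simp [pvStepA, hj, pvRowList, h11]
    omega
  | succ n hn ih =>
    intro j b l hj
    rw [PySem.List.pyRange_one_succ_right (by omega), List.foldl_append, ih _ _ _ hj,
      List.foldl_cons, List.foldl_nil]
    have hn0 : (n == (0 : Int)) = false := by simp; omega
    rw [Prod.ext_iff]
    refine ⟨by simp [pvStepA, hn0, hj]; ring, ?_⟩
    simp [pvStepA, hn0, hj, pvRowList,
      PySem.List.pyRange_one_succ_right (a := 1) (b := n) (by omega : (1:Int) ≤ n)]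
    ring

-- A's outer loop over the rows i_u = 1 .. u-1
theorem pvOuterA (v : Int) (hv : 1 ≤ v) (u : Int) (hu : 1 ≤ u) :
    ∀ l : List Int,
      (PySem.List.pyRange 1 u 1).foldl
          (fun st i_u => (PySem.List.pyRange 0 v 1).foldl (pvStepA i_u) st)
          (3 * v + 1, l)
        = (3 * v + 1 + (u - 1) * (2 * v + 1),
           l ++ (PySem.List.pyRange 1 u 1).flatMap
             (fun i_u => pvRowList (3 * v + 1 + (i_u - 1) * (2 * v + 1)) v)) := by
  induction u, hu using Int.le_induction with
  | base =>
    intro l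
    simp [PySem.List.pyRange_one_eq_nil (a := 1) (b := 1) (by omega : (1:Int) ≤ 1)]
  | succ n hn ih =>
    intro l
    rw [PySem.List.pyRange_one_succ_right (by omega), List.foldl_append, ih,
      List.flatMap_append, List.foldl_cons, List.foldl_nil,
      pvRowA v hv n _ _ (by omega)]
    rw [Prod.ext_iff]
    refine ⟨by ring, ?_⟩
    simp [List.append_assoc]

-- folding a function that ignores the element is the identity (A's outer loop when v ≤ 0)
theorem pvFoldlFixed {α β : Type} (xs : List α) (st : β) :
    xs.foldl (fun st _ => st) st = st := by
  induction xs with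
  | nil => rfl
  | cons x xs ih => exact ih

-- B's result written as two flatMaps
theorem pvAltEq (u v : Int) (hu : 1 ≤ u) (hv : 1 ≤ v) :
    get_v_edge_indices_alt u v
      = (PySem.List.pyRange 0 v 1).flatMap pvCell0
        ++ (PySem.List.pyRange 1 u 1).flatMap
             (fun i_u => pvRowList (3 * v + 1 + (i_u - 1) * (2 * v + 1)) v) := by
  unfold get_v_edge_indices_alt
  rw [if_neg (by omega)]
  simp only []
  have h1 : (PySem.List.pyRange 0 v 1).foldl
      (fun acc i_v =>
        acc ++ (let s := if i_v == 0 then (0 : Int) else 3 * i_v + 1; [s, s + 2])) []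
      = (PySem.List.pyRange 0 v 1).flatMap pvCell0 := by
    rw [PySem.List.foldl_append_eq_flatMap]
    rfl
  have h2 : (fun (acc : List Int) (i_u : Int) =>
      (PySem.List.pyRange 1 v 1).foldl
        (fun acc2 i_v => acc2 ++ [3 * v + 1 + (i_u - 1) * (2 * v + 1) + 2 * i_v + 2])
        (acc ++ [3 * v + 1 + (i_u - 1) * (2 * v + 1) + 1]))
      = fun acc i_u => acc ++ pvRowList (3 * v + 1 + (i_u - 1) * (2 * v + 1)) v := by
    funext acc i_u
    rw [PySem.List.foldl_append_singleton_eq_map, pvRowList, List.append_assoc,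
      List.singleton_append]
  rw [h1, h2, PySem.List.foldl_append_eq_flatMap]

-- ===== VERDICT (by name: the statement is the Claim_ definition above) =====
theorem get_v_edge_indices_spec : Claim_equal_get_v_edge_indices := by
  intro u v _
  unfold Spec_get_v_edge_indices
  by_cases hu : u ≤ 0
  · unfold get_v_edge_indices get_v_edge_indices_alt
    rw [if_pos (Or.inl hu), PySem.List.pyRange_one_eq_nil (a := 0) (b := u) (by omega)]
    rfl
  · by_cases hv : v ≤ 0
    · unfold get_v_edge_indices get_v_edge_indices_alt
      rw [if_pos (Or.inr hv)]
      simp only [PySem.List.pyRange_one_eq_nil (a := 0) (b := v) hv, List.foldl_nil]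
      rw [pvFoldlFixed]
    · have hv1 : 1 ≤ v := by omega
      have hu1 : 1 ≤ u := by omega
      unfold get_v_edge_indices
      rw [pvAltEq u v hu1 hv1,
        PySem.List.pyRange_one_append 0 1 u (by omega) hu1, List.foldl_append,
        show PySem.List.pyRange 0 1 1 = [(0 : Int)] from by decide,
        List.foldl_cons, List.foldl_nil, pvRow0A v hv1, pvOuterA v hv1 u hu1]
      simp
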